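-- pv_equiv track=rewrite | github.com/Georgia-MAX-holic/for_codingtest | 프로그래머스_귤고르기.py | solution
-- ===== SOURCE A (Python) =====
-- import collections
--
-- def solution(k, tangerine):
--     cnt=0
--     POP=0
--     luka=collections.Counter(tangerine) # 딕셔너리 형식으로 카운트
--     LUKA=sorted(luka.values()) # 값만 반환
--
--     for i in range(len(LUKA)):
--         POP+=LUKA.pop()
--         cnt+=1
--         if POP>=k:
--             return cnt
-- ===== SOURCE B (Python) =====
-- def solution(k, tangerine):
--     # Count types, then bucket the counts into a histogram and walk count
--     # values from the maximum downward: no sort needed.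
--     counts = {}
--     for t in tangerine:
--         counts[t] = counts.get(t, 0) + 1
--     hist = {}
--     mx = 0
--     for c in counts.values():
--         hist[c] = hist.get(c, 0) + 1
--         if mx < c:
--             mx = c
--     total = 0
--     cnt = 0
--     for c in range(mx, 0, -1):
--         for _ in range(hist.get(c, 0)):
--             total += c
--             cnt += 1
--             if total >= k:
--                 return cnt
-- ===== Notes on version B (the rewrite author's own statement) =====
-- stated objective: alternative
-- what changed: Replaces A's sort of the type counts followed by popping the largest repeatedly with a histogram over count values walked from the maximum count downward (counting sort flavour), so no comparison sort is performed.
-- outside the precondition, e.g. on solution(5, []): A returns None, B returns None; on solution(4, [1, 1, 2]): A returns None, B returns None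
import Mathlib
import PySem

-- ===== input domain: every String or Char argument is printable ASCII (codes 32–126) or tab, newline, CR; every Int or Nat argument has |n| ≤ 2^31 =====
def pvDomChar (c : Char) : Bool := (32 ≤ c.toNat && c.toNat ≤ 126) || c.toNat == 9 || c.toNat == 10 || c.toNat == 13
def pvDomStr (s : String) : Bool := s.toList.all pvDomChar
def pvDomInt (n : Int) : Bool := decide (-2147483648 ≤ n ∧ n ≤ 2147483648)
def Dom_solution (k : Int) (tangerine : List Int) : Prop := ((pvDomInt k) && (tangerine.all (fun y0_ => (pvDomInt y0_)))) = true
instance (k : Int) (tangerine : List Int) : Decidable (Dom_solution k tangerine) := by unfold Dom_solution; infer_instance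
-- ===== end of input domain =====

-- B replaces A's sort of the type counts (pop largest repeatedly) by a histogram of
-- count values walked from the maximum count downward; same return value on Pre_.


-- ===== PORT A =====
-- the 'for i in range(len(LUKA))' loop: fuel = len(LUKA); each step pops the last
-- element, accumulates, and returns cnt once POP >= k; none = fell through (Python None)
def solutionAuxA (k : Int) : Nat → List Int → Int → Int → Option Int
  | 0, _, _, _ => none
  | fuel + 1, luka, pop, cnt =>
    match PySem.List.pop? luka (-1) with
    | none => none
    | some (x, rest) =>
      if pop + x ≥ k then some (cnt + 1)
      else solutionAuxA k fuel rest (pop + x) (cnt + 1)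

def solution (k : Int) (tangerine : List Int) : Int :=
  let luka := PySem.Dict.counter tangerine
  let LUKA := PySem.List.sorted luka.values (fun v => v) false
  -- Python returns None when the loop falls through; that case is excluded by
  -- Pre_solution, the port returns 0 there
  (solutionAuxA k LUKA.length LUKA 0 0).getD 0

-- ===== PORT B =====
-- inner 'for _ in range(hist.get(c, 0))': inl = returned cnt, inr = loop finished
def solutionInnerB (k c : Int) : Nat → Int → Int → Sum Int (Int × Int)
  | 0, total, cnt => Sum.inr (total, cnt)
  | n + 1, total, cnt =>
    if total + c ≥ k then Sum.inl (cnt + 1)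
    else solutionInnerB k c n (total + c) (cnt + 1)

-- outer 'for c in range(mx, 0, -1)'
def solutionOuterB (k : Int) (hist : PySem.Dict Int Int) : List Int → Int → Int → Option Int
  | [], _, _ => none
  | c :: cs, total, cnt =>
    match solutionInnerB k c (hist.getD c 0).toNat total cnt with
    | Sum.inl r => some r
    | Sum.inr (t, m) => solutionOuterB k hist cs t m

def solution_alt (k : Int) (tangerine : List Int) : Int :=
  let counts := tangerine.foldl (fun d t => d.insert t (d.getD t 0 + 1)) PySem.Dict.empty
  let hm := counts.values.foldl
    (fun (p : PySem.Dict Int Int × Int) c =>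
      (p.1.insert c (p.1.getD c 0 + 1), if p.2 < c then c else p.2))
    (PySem.Dict.empty, 0)
  -- Python returns None when the loops fall through; excluded by Pre_solution, 0 here
  (solutionOuterB k hm.1 (PySem.List.pyRange hm.2 0 (-1)) 0 0).getD 0

-- ===== PRECONDITION & SPEC =====
-- Pre_ excludes exactly the inputs (empty list, or k > len(tangerine)) on which the
-- Python A falls through its loop and returns None, which is not an int.
def Pre_solution (k : Int) (tangerine : List Int) : Prop :=
  tangerine ≠ [] ∧ k ≤ (tangerine.length : Int)
instance (k : Int) (tangerine : List Int) : Decidable (Pre_solution k tangerine) := by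
  unfold Pre_solution; infer_instance

def pvWitness_solution : Int × List Int := (2, [1, 1, 2])

def Spec_solution (k : Int) (tangerine : List Int) (out : Int) : Prop := out = solution_alt k tangerine
instance (k : Int) (tangerine : List Int) (out : Int) : Decidable (Spec_solution k tangerine out) := by unfold Spec_solution; infer_instance

-- ===== CLAIM (what is proved, stated in full; the proofs are below) =====
def Claim_equal_solution : Prop := ∀ (k : Int) (tangerine : List Int), Dom_solution k tangerine → Pre_solution k tangerine → Spec_solution k tangerine (solution k tangerine)

-- ===== LEMMAS AND PROOFS =====

-- common greedy consumption: walk a descending list of counts accumulating until ≥ k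
def pvConsume (k : Int) : List Int → Int → Int → Option Int
  | [], _, _ => none
  | x :: xs, pop, cnt => if pop + x ≥ k then some (cnt + 1) else pvConsume k xs (pop + x) (cnt + 1)

lemma pop_concat (xs : List Int) (x : Int) :
    PySem.List.pop? (xs ++ [x]) (-1) = some (x, xs) := by
  simp [PySem.List.pop?, PySem.List.pyIdx?, List.eraseIdx_append_of_length_le (Nat.le_refl _)]

lemma auxA_eq (k : Int) (L : List Int) : ∀ pop cnt,
    solutionAuxA k L.length L pop cnt = pvConsume k L.reverse pop cnt := by
  induction L using List.reverseRecOn with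
  | nil => intro pop cnt; rfl
  | append_singleton xs x ih =>
    intro pop cnt
    have hl : (xs ++ [x]).length = xs.length + 1 := by simp
    rw [hl]
    simp only [solutionAuxA, pop_concat, List.reverse_append, List.reverse_singleton,
      List.singleton_append, pvConsume]
    split
    · rfl
    · exact ih _ _

lemma innerB_eq (k c : Int) (n : Nat) : ∀ total cnt (rest : List Int),
    (match solutionInnerB k c n total cnt with
     | Sum.inl r => some r
     | Sum.inr (t, m) => pvConsume k rest t m)
    = pvConsume k (List.replicate n c ++ rest) total cnt := by
  induction n with
  | zero => intro total cnt rest; rfl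
  | succ n ih =>
    intro total cnt rest
    simp only [solutionInnerB, List.replicate_succ, List.cons_append, pvConsume]
    by_cases h : total + c ≥ k
    · simp only [if_pos h]
    · simp only [if_neg h]
      exact ih _ _ _

lemma outerB_eq (k : Int) (hist : PySem.Dict Int Int) (cs : List Int) : ∀ total cnt,
    solutionOuterB k hist cs total cnt
    = pvConsume k (cs.flatMap (fun c => List.replicate (hist.getD c 0).toNat c)) total cnt := by
  induction cs with
  | nil => intro total cnt; rfl
  | cons c cs ih =>
    intro total cnt
    simp only [solutionOuterB, List.flatMap_cons]
    rw [← innerB_eq k c _ total cnt]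
    cases solutionInnerB k c (hist.getD c 0).toNat total cnt with
    | inl r => rfl
    | inr p =>
      obtain ⟨t, m⟩ := p
      exact ih _ _

lemma pyRange_down_eq (a : Int) :
    PySem.List.pyRange a 0 (-1) = (List.range a.toNat).map (fun k : Nat => a - (k : Int)) := by
  simp only [PySem.List.pyRange]
  have h1 : (if 0 < a then ((a - 0 + - -1 - 1) / - -1).toNat else 0) = a.toNat := by
    norm_num; intro h; omega
  simp only [if_neg (by norm_num : ¬ (-1 : Int) = 0), if_neg (by norm_num : ¬ (0:Int) < -1), h1]
  apply List.map_congr_left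
  intro k _
  ring

lemma pyRange_down_nil (a : Int) (h : a ≤ 0) : PySem.List.pyRange a 0 (-1) = [] := by
  simp [PySem.List.pyRange]; omega

lemma pyRange_down_cons (a : Int) (h : 0 < a) :
    PySem.List.pyRange a 0 (-1) = a :: PySem.List.pyRange (a - 1) 0 (-1) := by
  obtain ⟨n, hn⟩ : ∃ n, a.toNat = n + 1 := ⟨a.toNat - 1, by omega⟩
  have hn' : (a - 1).toNat = n := by omega
  rw [pyRange_down_eq, pyRange_down_eq, hn, hn', List.range_succ_eq_map]
  simp only [List.map_cons, List.map_map, Nat.cast_zero]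
  congr 1
  · ring
  · apply List.map_congr_left
    intro k _
    simp only [Function.comp]
    push_cast
    ring

lemma mem_pyRange_down {a c : Int} (h : c ∈ PySem.List.pyRange a 0 (-1)) : 1 ≤ c ∧ c ≤ a := by
  rw [pyRange_down_eq] at h
  simp only [List.mem_map, List.mem_range] at h
  obtain ⟨k, hk, rfl⟩ := h
  omega

lemma count_flat (vals : List Int) (x : Int) : ∀ (n : Nat) (a : Int), a.toNat = n →
    ((PySem.List.pyRange a 0 (-1)).flatMap (fun c => List.replicate (vals.count c) c)).count x
    = if 1 ≤ x ∧ x ≤ a then vals.count x else 0 := by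
  intro n
  induction n with
  | zero =>
    intro a ha
    rw [pyRange_down_nil a (by omega)]
    simp only [List.flatMap_nil, List.count_nil]
    rw [if_neg (by omega)]
  | succ n ih =>
    intro a ha
    rw [pyRange_down_cons a (by omega)]
    simp only [List.flatMap_cons, List.count_append]
    rw [ih (a - 1) (by omega), List.count_replicate]
    by_cases hx : x = a
    · subst hx
      rw [if_pos (by simp), if_neg (by omega), if_pos (by omega)]
      omega
    · rw [if_neg (by intro h; exact hx (beq_iff_eq.mp h).symm)]
      by_cases hr : 1 ≤ x ∧ x ≤ a - 1
      · rw [if_pos hr, if_pos (by omega)]; ring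
      · rw [if_neg hr, if_neg (by omega)]

lemma pairwise_flat (vals : List Int) : ∀ (n : Nat) (a : Int), a.toNat = n →
    List.Pairwise (fun p q : Int => q ≤ p)
      ((PySem.List.pyRange a 0 (-1)).flatMap (fun c => List.replicate (vals.count c) c)) := by
  intro n
  induction n with
  | zero =>
    intro a ha
    rw [pyRange_down_nil a (by omega)]
    simp
  | succ n ih =>
    intro a ha
    rw [pyRange_down_cons a (by omega)]
    simp only [List.flatMap_cons]
    rw [List.pairwise_append]
    refine ⟨List.pairwise_replicate.mpr (by omega), ih (a - 1) (by omega), ?_⟩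
    intro p hp q hq
    obtain rfl := List.eq_of_mem_replicate hp
    obtain ⟨c, hc, hq'⟩ := List.mem_flatMap.mp hq
    obtain rfl := List.eq_of_mem_replicate hq'
    have := mem_pyRange_down hc
    omega

lemma vals_pos (tangerine : List Int) :
    ∀ v ∈ (PySem.Dict.counter tangerine).values, 1 ≤ v := by
  intro v hv
  simp only [PySem.Dict.values, PySem.Dict.items_counter, List.map_map, List.mem_map,
    Function.comp] at hv
  obtain ⟨x, hx, rfl⟩ := hv
  have hx' : x ∈ tangerine := (PySem.Set.mem_ofList _ _).mp hx
  have := List.count_pos_iff.mpr hx'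
  omega

lemma mx_eq (vals : List Int) :
    vals.foldl (fun m c => if m < c then c else m) 0 = vals.foldl max 0 :=
  PySem.List.foldl_congr_mem vals (fun m c => if m < c then c else m) max 0
    (fun acc x _ => by simp only [max_def]; split <;> split <;> omega)

-- the two descending lists coincide
lemma lists_eq (vals : List Int) (hpos : ∀ v ∈ vals, 1 ≤ v) :
    (PySem.List.sorted vals (fun v => v) false).reverse
    = (PySem.List.pyRange (vals.foldl max 0) 0 (-1)).flatMap
        (fun c => List.replicate (vals.count c) c) := by
  have hub : ∀ v ∈ vals, v ≤ vals.foldl max 0 := (PySem.List.le_foldl_max vals 0).2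
  have hperm : ((PySem.List.sorted vals (fun v => v) false).reverse).Perm vals :=
    (List.reverse_perm _).trans (PySem.List.sorted_perm vals _ false)
  have hperm2 : vals.Perm ((PySem.List.pyRange (vals.foldl max 0) 0 (-1)).flatMap
      (fun c => List.replicate (vals.count c) c)) := by
    rw [List.perm_iff_count]
    intro x
    rw [count_flat vals x _ _ rfl]
    by_cases hx : 1 ≤ x ∧ x ≤ vals.foldl max 0
    · rw [if_pos hx]
    · rw [if_neg hx]
      exact List.count_eq_zero.mpr (fun hmem => hx ⟨hpos x hmem, hub x hmem⟩)
  refine List.Perm.eq_of_pairwise (le := fun p q : Int => q ≤ p)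
    (fun a b _ _ h1 h2 => le_antisymm h2 h1) ?_ (pairwise_flat vals _ _ rfl)
    (hperm.trans hperm2)
  rw [List.pairwise_reverse]
  exact PySem.List.sorted_pairwise vals (fun v => v)

theorem solution_eq_alt (k : Int) (tangerine : List Int) :
    solution k tangerine = solution_alt k tangerine := by
  simp only [solution, solution_alt, PySem.Dict.foldl_insert_getD_add_one_eq_counter]
  rw [PySem.List.foldl_prod_mk (f := fun d c => PySem.Dict.insert d c (d.getD c 0 + 1))
    (g := fun m c => if m < c then c else m)]
  rw [PySem.Dict.foldl_insert_getD_add_one_eq_counter, mx_eq]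
  rw [auxA_eq, outerB_eq]
  have hflat : ∀ a : Int,
      (PySem.List.pyRange a 0 (-1)).flatMap
        (fun c => List.replicate ((PySem.Dict.counter
          (PySem.Dict.counter tangerine).values).getD c 0).toNat c)
      = (PySem.List.pyRange a 0 (-1)).flatMap
        (fun c => List.replicate ((PySem.Dict.counter tangerine).values.count c) c) := by
    intro a
    simp only [PySem.Dict.getD_counter, Int.toNat_natCast]
  rw [hflat, ← lists_eq _ (vals_pos tangerine)]

-- ===== VERDICT (by name: the statement is the Claim_ definition above) =====
theorem solution_spec : Claim_equal_solution := by
  intro k tangerine _ _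
  exact solution_eq_alt k tangerine
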